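-- pv_equiv track=rewrite | github.com/iXioN/groover-concert-planning | concert_prog.py | is_programation_possible
-- ===== SOURCE A (Python) =====
-- from typing import FrozenSet, Generator, Iterable, Iterator, List, Tuple, Union
--
-- MAXIMUM_NUMBER_OF_TRACKS = 3
--
-- def combinations(items: Union[List, Tuple], n: int) -> Iterator[Tuple[int]]:
--     """
--     A generator that yield all the UNIQUE combination items with n elements
--     Args:
--         items (list or tuple): The sequence of item to combine
--         n (int): The length of elements that will be present in the returned subsequences
--
--     Yields:
--         Iterator[Tuple[int]]: n lenght subsequences of elements combined from items
--     """
--     if n == 0: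
--         yield tuple()
--     else:
--         for i in range(len(items)):
--             for sub in combinations(items[i + 1 :], n - 1):
--                 item = items[i]
--                 item = [item] if isinstance(item, int) else item
--                 yield tuple(item) + sub
--
-- def _is_programation_possible_for_number_of_track(
--     concert_premiere_length: int,
--     track_lenghts: Iterable[int],
--     number_of_tracks: int,
--     tolerence: int = 0,
-- ) -> bool:
--     """
--     a function that return a boolean depending if the programation is possible based on a possible number of tracks
--
--     Args:
--         concert_premiere_length (int): an integer that represent the time in minute of a concert premier
--         track_lenghts (Itcerable[int]): an iterable containing int that represent the track length in minutes
--         number_of_tracks (bool, optional): do you want to use the number of track to MAXIMUM_NUMBER_OF_TRACKS. Defaults to True.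
--         tolerence (int, optional): The tolenrence in minutes the sum of track lenght can be arround the concert_premiere_length. Defaults to 0.
--
--     Returns:
--         bool: is the programation possible
--     """
--     for possible_tracks in combinations(track_lenghts, number_of_tracks):
--         # do the sum and verify if the sum is around the concert_premiere_length +/- the tolerence
--         if abs(sum(possible_tracks) - concert_premiere_length) <= tolerence:
--             return True
--     return False
--
-- def is_programation_possible(
--     concert_premiere_length: int,
--     track_lenghts: Iterable[int],
--     limit_number_of_tracks: bool = True,
--     tolerence: int = 0,
-- ) -> bool:
--     """
--     a function that return a boolean depending if the programation is possible based on a possible number of tracks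
--
--     Args:
--         concert_premiere_length (int): an integer that represent the time in minute of a concert premier
--         track_lenghts (Iterable[int]): an iterable containing int that represent the track length in minutes
--         limit_number_of_tracks (bool, optional): do you want to use the number of track to MAXIMUM_NUMBER_OF_TRACKS. Defaults to True.
--         tolerence (int, optional): The tolenrence in minutes the sum of track lenght can be arround the concert_premiere_length. Defaults to 0.
--
--     Returns:
--         bool: is the programation possible
--     """
--     # quicky check the sum of track_lenght
--     total_track_lenght = sum(track_lenghts)
--     # if the sum of tracks is lower than concert_premiere_length it ts impossible to fill the time
--     if total_track_lenght < concert_premiere_length: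
--         return False
--     # if by change the sum is exactly equals to the concert_premiere_length, bingo
--     elif total_track_lenght == concert_premiere_length:
--         return True
--
--     # if the smallest track lenght is biggert than the concert_premiere_length, don't start start the combination and fail fast
--     if min(track_lenghts) >= concert_premiere_length:
--         return False
--
--     # if limit_number_of_tracks is set to false, don't use the MAXIMUM_NUMBER_OF_TRACKS constant and try all the possible combination from 1 element to len(track_lenghts) possible combination
--     if limit_number_of_tracks:
--         return _is_programation_possible_for_number_of_track(
--             concert_premiere_length,
--             track_lenghts,
--             number_of_tracks=MAXIMUM_NUMBER_OF_TRACKS,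
--             tolerence=tolerence,
--         )
--     else:
--         for number_of_tracks in range(1, len(track_lenghts)):
--             match = _is_programation_possible_for_number_of_track(
--                 concert_premiere_length,
--                 track_lenghts,
--                 number_of_tracks=number_of_tracks,
--                 tolerence=tolerence,
--             )
--             if match:
--                 return True
--     return False
-- ===== SOURCE B (Python) =====
-- def is_programation_possible(
--     concert_premiere_length,
--     track_lenghts,
--     limit_number_of_tracks=True,
--     tolerence=0,
-- ):
--     # Same fast-path guards as the spec, then a breadth-first layered search:
--     # layer k is the deduplicated set of (sum, last index) states of all
--     # k-element index subsets, built from layer k-1, with an early exit.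
--     total = sum(track_lenghts)
--     if total < concert_premiere_length:
--         return False
--     if total == concert_premiere_length:
--         return True
--     if min(track_lenghts) >= concert_premiere_length:
--         return False
--     n = len(track_lenghts)
--     kmax = 3 if limit_number_of_tracks else n - 1
--     lo = concert_premiere_length - tolerence
--     hi = concert_premiere_length + tolerence
--     layer = {(0, -1)}
--     for k in range(1, kmax + 1):
--         check = (not limit_number_of_tracks) or k == 3
--         nxt = set()
--         for (s, i) in layer:
--             for j in range(i + 1, n):
--                 v = s + track_lenghts[j]
--                 if check and lo <= v <= hi:
--                     return True
--                 nxt.add((v, j))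
--         layer = nxt
--     return False
-- ===== Notes on version B (the rewrite author's own statement) =====
-- stated objective: alternative
-- what changed: Replaces the recursive combinations generator (re-run from scratch for every subset size, with repeated list slicing) by a breadth-first layered search that builds the deduplicated set of (sum, last-index) states of size-k subsets from the size-(k-1) layer and exits as soon as a sum lands in the tolerance window.
import Mathlib
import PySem

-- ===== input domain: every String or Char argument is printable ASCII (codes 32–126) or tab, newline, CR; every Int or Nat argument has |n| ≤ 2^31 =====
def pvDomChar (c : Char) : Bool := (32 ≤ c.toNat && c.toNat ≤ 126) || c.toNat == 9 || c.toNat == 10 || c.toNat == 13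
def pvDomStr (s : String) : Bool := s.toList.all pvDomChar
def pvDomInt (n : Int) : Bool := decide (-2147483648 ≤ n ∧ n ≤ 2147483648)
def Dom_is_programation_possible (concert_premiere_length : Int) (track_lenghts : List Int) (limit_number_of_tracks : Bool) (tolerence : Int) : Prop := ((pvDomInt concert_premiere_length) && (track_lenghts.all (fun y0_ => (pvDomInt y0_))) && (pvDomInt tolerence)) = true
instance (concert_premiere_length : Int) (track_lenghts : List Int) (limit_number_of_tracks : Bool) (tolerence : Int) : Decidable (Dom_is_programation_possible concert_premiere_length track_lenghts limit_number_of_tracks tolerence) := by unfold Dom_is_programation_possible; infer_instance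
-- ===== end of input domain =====

-- B replaces A's per-size recursive combination enumeration by a breadth-first layered
-- search over deduplicated (sum, last-index) states; equality of the RETURN value is
-- proved on Pre_ (which only excludes the inputs where the Python A raises).

-- ===== PORT A =====
-- combinations(items, n): recursive generator, collected as a list (items are always ints here)
def pyCombinations (items : List Int) : Nat → List (List Int)
  | 0 => [[]]
  | n + 1 =>
    (List.range items.length).flatMap (fun i =>
      (pyCombinations (items.drop (i + 1)) n).map (fun sub => items.getD i 0 :: sub))

-- _is_programation_possible_for_number_of_track: first-match loop = List.any
def pyHelperA (concert_premiere_length : Int) (track_lenghts : List Int) (number_of_tracks : Nat) (tolerence : Int) : Bool :=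
  (pyCombinations track_lenghts number_of_tracks).any
    (fun c => decide (|c.sum - concert_premiere_length| ≤ tolerence))

def is_programation_possible (concert_premiere_length : Int) (track_lenghts : List Int) (limit_number_of_tracks : Bool) (tolerence : Int) : Bool :=
  let total := track_lenghts.sum
  if total < concert_premiere_length then false
  else if total = concert_premiere_length then true
  -- min(track_lenghts): raises on [], excluded by Pre_; .getD 0 is only reached outside Pre_
  else if concert_premiere_length ≤ ((PySem.List.min? track_lenghts (fun x => x)).getD 0) then false
  else if limit_number_of_tracks then
    pyHelperA concert_premiere_length track_lenghts 3 tolerence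
  else
    (List.range' 1 (track_lenghts.length - 1)).any
      (fun k => pyHelperA concert_premiere_length track_lenghts k tolerence)

-- ===== PORT B =====
-- all (sum, last index) states produced from one layer: the inner double loop's yield
def pvNext (ts : List Int) (layer : PySem.Set (Int × Int)) : List (Int × Int) :=
  layer.flatMap (fun p =>
    (PySem.List.pyRange (p.2 + 1) (ts.length : Int) 1).map
      (fun j => (p.1 + PySem.List.pyGetD ts j 0, j)))

-- the 'for k in range(1, kmax+1)' loop with its early return
def pvLoop (ts : List Int) (lo hi : Int) (limit : Bool) : List Nat → PySem.Set (Int × Int) → Bool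
  | [], _ => false
  | k :: ks, layer =>
    let nxt := pvNext ts layer
    if (!limit || k == 3) && nxt.any (fun p => decide (lo ≤ p.1 ∧ p.1 ≤ hi)) then true
    else pvLoop ts lo hi limit ks (PySem.Set.ofList nxt)

def is_programation_possible_alt (concert_premiere_length : Int) (track_lenghts : List Int) (limit_number_of_tracks : Bool) (tolerence : Int) : Bool :=
  let total := track_lenghts.sum
  if total < concert_premiere_length then false
  else if total = concert_premiere_length then true
  else if concert_premiere_length ≤ ((PySem.List.min? track_lenghts (fun x => x)).getD 0) then false
  else
    let kmax : Nat := if limit_number_of_tracks then 3 else track_lenghts.length - 1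
    pvLoop track_lenghts (concert_premiere_length - tolerence) (concert_premiere_length + tolerence)
      limit_number_of_tracks (List.range' 1 kmax) (PySem.Set.ofList [((0 : Int), (-1 : Int))])

-- ===== PRECONDITION & SPEC =====
-- Pre_ excludes only the inputs where Python A raises: track_lenghts = [] with a negative
-- concert length reaches min([]) (ValueError).
def Pre_is_programation_possible (concert_premiere_length : Int) (track_lenghts : List Int) (limit_number_of_tracks : Bool) (tolerence : Int) : Prop :=
  track_lenghts ≠ [] ∨ 0 ≤ concert_premiere_length
instance (concert_premiere_length : Int) (track_lenghts : List Int) (limit_number_of_tracks : Bool) (tolerence : Int) : Decidable (Pre_is_programation_possible concert_premiere_length track_lenghts limit_number_of_tracks tolerence) := by unfold Pre_is_programation_possible; infer_instance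

def pvWitness_is_programation_possible : Int × List Int × Bool × Int := (5, [2, 3], true, 0)

def Spec_is_programation_possible (concert_premiere_length : Int) (track_lenghts : List Int) (limit_number_of_tracks : Bool) (tolerence : Int) (out : Bool) : Prop := out = is_programation_possible_alt concert_premiere_length track_lenghts limit_number_of_tracks tolerence
instance (concert_premiere_length : Int) (track_lenghts : List Int) (limit_number_of_tracks : Bool) (tolerence : Int) (out : Bool) : Decidable (Spec_is_programation_possible concert_premiere_length track_lenghts limit_number_of_tracks tolerence out) := by unfold Spec_is_programation_possible; infer_instance

-- ===== CLAIM (what is proved, stated in full; the proofs are below) =====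
def Claim_equal_is_programation_possible : Prop := ∀ (concert_premiere_length : Int) (track_lenghts : List Int) (limit_number_of_tracks : Bool) (tolerence : Int), Dom_is_programation_possible concert_premiere_length track_lenghts limit_number_of_tracks tolerence → Pre_is_programation_possible concert_premiere_length track_lenghts limit_number_of_tracks tolerence → Spec_is_programation_possible concert_premiere_length track_lenghts limit_number_of_tracks tolerence (is_programation_possible concert_premiere_length track_lenghts limit_number_of_tracks tolerence)

-- ===== LEMMAS AND PROOFS =====

-- A's combinations(items, k) yields exactly the length-k sublists of items.
theorem mem_pyCombinations (k : Nat) : ∀ (items c : List Int),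
    c ∈ pyCombinations items k ↔ c.Sublist items ∧ c.length = k := by
  induction k with
  | zero =>
    intro items c
    simp [pyCombinations, List.length_eq_zero_iff]
    rintro rfl; exact List.nil_sublist _
  | succ n ih =>
    intro items c
    constructor
    · intro hc
      simp only [pyCombinations, List.mem_flatMap, List.mem_map, List.mem_range] at hc
      obtain ⟨i, hi, sub, hsub, rfl⟩ := hc
      obtain ⟨hs, hl⟩ := (ih _ _).1 hsub
      constructor
      · have hdrop : items.drop i = items.getD i 0 :: items.drop (i + 1) := by
          rw [List.getD_eq_getElem _ _ hi]
          exact (List.getElem_cons_drop hi).symm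
        have : (items.getD i 0 :: sub).Sublist (items.drop i) := by
          rw [hdrop]; exact List.Sublist.cons₂ _ hs
        exact this.trans (List.drop_sublist i items)
      · simp [hl]
    · rintro ⟨hs, hl⟩
      match c with
      | [] => simp at hl
      | x :: sub =>
        obtain ⟨r₁, r₂, hitems, hx, hsub⟩ := List.cons_sublist_iff.1 hs
        obtain ⟨p, q, rfl⟩ := List.append_of_mem hx
        have hitems' : items = p ++ x :: (q ++ r₂) := by simp [hitems]
        subst hitems'
        simp only [pyCombinations, List.mem_flatMap, List.mem_map, List.mem_range]
        refine ⟨p.length, by simp, sub, (ih _ _).2 ⟨?_, by simpa using hl⟩, ?_⟩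
        · have hdrop : (p ++ x :: (q ++ r₂)).drop (p.length + 1) = q ++ r₂ := by
            simp [List.drop_append]
          rw [hdrop]
          exact hsub.trans (List.sublist_append_right q r₂)
        · have hget : (p ++ x :: (q ++ r₂)).getD p.length 0 = x := by
            simp [List.getD_eq_getElem?_getD]
          rw [hget]

theorem pyHelperA_iff (L : Int) (ts : List Int) (k : Nat) (tol : Int) :
    pyHelperA L ts k tol = true ↔
      ∃ c : List Int, c.Sublist ts ∧ c.length = k ∧ L - tol ≤ c.sum ∧ c.sum ≤ L + tol := by
  simp only [pyHelperA, List.any_eq_true, decide_eq_true_eq]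
  constructor
  · rintro ⟨c, hc, hw⟩
    obtain ⟨hs, hl⟩ := (mem_pyCombinations k ts c).1 hc
    have := abs_le.1 hw
    exact ⟨c, hs, hl, by omega, by omega⟩
  · rintro ⟨c, hs, hl, h1, h2⟩
    exact ⟨c, (mem_pyCombinations k ts c).2 ⟨hs, hl⟩, abs_le.2 ⟨by omega, by omega⟩⟩

-- last-element decomposition of a sublist
theorem concat_sublist_iff (ts c : List Int) (x : Int) :
    (c ++ [x]).Sublist ts ↔
      ∃ j : Nat, j < ts.length ∧ ts.getD j 0 = x ∧ c.Sublist (ts.take j) := by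
  rw [List.append_sublist_iff]
  constructor
  · rintro ⟨r₁, r₂, rfl, hc, hx⟩
    rw [List.singleton_sublist] at hx
    obtain ⟨u, v, rfl⟩ := List.append_of_mem hx
    refine ⟨(r₁ ++ u).length, by simp, ?_, ?_⟩
    · have : (r₁ ++ (u ++ x :: v)).getD (r₁ ++ u).length 0
          = ((r₁ ++ u) ++ x :: v).getD (r₁ ++ u).length 0 := by simp
      rw [this]
      simp [List.getD_eq_getElem?_getD]
    · have htake : (r₁ ++ (u ++ x :: v)).take (r₁ ++ u).length = r₁ ++ u := by
        have : r₁ ++ (u ++ x :: v) = (r₁ ++ u) ++ x :: v := by simp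
        rw [this, List.take_append_of_le_length (by simp)]
        simp
      rw [htake]
      exact hc.trans (List.sublist_append_left r₁ u)
  · rintro ⟨j, hj, hget, hc⟩
    refine ⟨ts.take j, ts.drop j, (List.take_append_drop j ts).symm, hc, ?_⟩
    rw [List.singleton_sublist, ← hget, List.getD_eq_getElem _ _ hj]
    exact List.mem_iff_getElem.2 ⟨j - j, by simp [hj], by simp⟩

-- the states of layer k: (sum, last index) of each k-element index subset
def pvState (ts : List Int) (k : Nat) (p : Int × Int) : Prop :=
  (k = 0 ∧ p = (0, -1)) ∨
  ∃ j : Nat, j < ts.length ∧ p.2 = (j : Int) ∧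
    ∃ c : List Int, c.Sublist (ts.take j) ∧ c.length + 1 = k ∧ p.1 = c.sum + ts.getD j 0

theorem mem_pvNext (ts : List Int) (k : Nat) (layer : PySem.Set (Int × Int))
    (hl : ∀ p, p ∈ layer ↔ pvState ts k p) :
    ∀ p, p ∈ pvNext ts layer ↔ pvState ts (k + 1) p := by
  intro p
  simp only [pvNext, List.mem_flatMap, List.mem_map, PySem.List.mem_pyRange_one]
  constructor
  · rintro ⟨q, hq, j, ⟨hj1, hj2⟩, rfl⟩
    rcases (hl q).1 hq with ⟨hk0, rfl⟩ | ⟨j₀, hj₀, hq2, c, hc, hck, hq1⟩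
    · have h0 : (0 : Int) ≤ j := by simp at hj1; omega
      obtain ⟨jn, rfl⟩ := Int.eq_ofNat_of_zero_le h0
      refine Or.inr ⟨jn, by exact_mod_cast hj2, rfl, [], by simp, by simp [hk0], ?_⟩
      simp [PySem.List.pyGetD_natCast]
    · have h0 : (0 : Int) ≤ j := by rw [hq2] at hj1; omega
      obtain ⟨jn, rfl⟩ := Int.eq_ofNat_of_zero_le h0
      have hjn : jn < ts.length := by exact_mod_cast hj2
      have hj₀jn : j₀ < jn := by rw [hq2] at hj1; exact_mod_cast (by omega : (j₀ : Int) < (jn : Int))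
      refine Or.inr ⟨jn, hjn, rfl, c ++ [ts.getD j₀ 0], ?_, by simp; omega, ?_⟩
      · have h1 : (c ++ [ts.getD j₀ 0]).Sublist (ts.take (j₀ + 1)) := by
          have : ts.take (j₀ + 1) = ts.take j₀ ++ [ts.getD j₀ 0] := by
            rw [List.take_succ, List.getD_eq_getElem _ _ hj₀, List.getElem?_eq_getElem hj₀]
            rfl
          rw [this]
          exact hc.append (List.Sublist.refl _)
        have h2 : (ts.take (j₀ + 1)).Sublist (ts.take jn) :=
          (List.take_prefix_take_left (l := ts) (by omega : j₀ + 1 ≤ jn)).sublist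
        exact h1.trans h2
      · simp [hq1, PySem.List.pyGetD_natCast]
  · rintro (⟨h, _⟩ | ⟨j, hj, hp2, c, hc, hck, hp1⟩)
    · omega
    · rcases c.eq_nil_or_concat with rfl | ⟨c', x, rfl⟩
      all_goals try simp only [List.concat_eq_append] at *
      · have hk : k = 0 := by simpa using hck
        subst hk
        refine ⟨(0, -1), (hl _).2 (Or.inl ⟨rfl, rfl⟩), (j : Int), ⟨by omega, by exact_mod_cast hj⟩, ?_⟩
        have : p = ((0 : Int) + PySem.List.pyGetD ts (j : Int) 0, (j : Int)) := by
          apply Prod.ext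
          · simp [hp1, PySem.List.pyGetD_natCast]
          · simp [hp2]
        exact this.symm
      · obtain ⟨j₀, hj₀, hget, hc'⟩ := (concat_sublist_iff (ts.take j) c' x).1 hc
        have hj₀j : j₀ < j := by simp at hj₀; omega
        have hj₀ts : j₀ < ts.length := by simp at hj₀; omega
        have hget' : ts.getD j₀ 0 = x := by
          rw [← hget, List.getD_eq_getElem _ _ hj₀, List.getD_eq_getElem _ _ hj₀ts]
          simp [List.getElem_take]
        have htt : (ts.take j).take j₀ = ts.take j₀ := by
          rw [List.take_take]; congr 1; omega
        refine ⟨(c'.sum + ts.getD j₀ 0, (j₀ : Int)),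
          (hl _).2 (Or.inr ⟨j₀, hj₀ts, rfl, c', by rwa [htt] at hc', by simpa using hck, rfl⟩),
          (j : Int), ⟨by simp; omega, by exact_mod_cast hj⟩, ?_⟩
        apply Prod.ext
        · show c'.sum + ts.getD j₀ 0 + PySem.List.pyGetD ts ((j : Nat) : Int) 0 = p.1
          rw [PySem.List.pyGetD_natCast, hp1, hget']
          simp [List.sum_append]
        · simp [hp2]

-- a layer-(k+1) state with a sum in the window IS a (k+1)-sublist with that sum
theorem pvState_window (ts : List Int) (k : Nat) (W : Int → Prop) :
    (∃ p, pvState ts (k + 1) p ∧ W p.1) ↔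
      ∃ c : List Int, c.Sublist ts ∧ c.length = k + 1 ∧ W c.sum := by
  constructor
  · rintro ⟨p, (⟨h, _⟩ | ⟨j, hj, hp2, c, hc, hck, hp1⟩), hw⟩
    · omega
    · refine ⟨c ++ [ts.getD j 0], (concat_sublist_iff ts c _).2 ⟨j, hj, rfl, hc⟩, by simp; omega, ?_⟩
      have hs : (c ++ [ts.getD j 0]).sum = p.1 := by rw [hp1]; simp
      rw [hs]; exact hw
  · rintro ⟨c, hc, hck, hw⟩
    rcases c.eq_nil_or_concat with rfl | ⟨c', x, rfl⟩
    all_goals try simp only [List.concat_eq_append] at *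
    · simp at hck
    · obtain ⟨j, hj, hget, hc'⟩ := (concat_sublist_iff ts c' x).1 hc
      refine ⟨(c'.sum + ts.getD j 0, (j : Int)),
        Or.inr ⟨j, hj, rfl, c', hc', by simpa using hck, rfl⟩, ?_⟩
      have hs : (c' ++ [x]).sum = c'.sum + ts.getD j 0 := by rw [hget]; simp
      show W (c'.sum + ts.getD j 0)
      rw [← hs]
      exact hw

-- the loop over k = k₀+1, …, k₀+m starting from a correct layer k₀
theorem pvLoop_iff (ts : List Int) (lo hi : Int) (limit : Bool) :
    ∀ (m k₀ : Nat) (layer : PySem.Set (Int × Int)),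
      (∀ p, p ∈ layer ↔ pvState ts k₀ p) →
      (pvLoop ts lo hi limit (List.range' (k₀ + 1) m) layer = true ↔
        ∃ k : Nat, k₀ + 1 ≤ k ∧ k < k₀ + 1 + m ∧ (limit = true → k = 3) ∧
          ∃ c : List Int, c.Sublist ts ∧ c.length = k ∧ lo ≤ c.sum ∧ c.sum ≤ hi) := by
  intro m
  induction m with
  | zero =>
    intro k₀ layer _
    simp only [List.range'_zero, pvLoop]
    constructor
    · intro h; cases h
    · rintro ⟨k, h1, h2, _⟩; omega
  | succ m ih =>
    intro k₀ layer hl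
    have hnxt := mem_pvNext ts k₀ layer hl
    have hwin : ((pvNext ts layer).any (fun p => decide (lo ≤ p.1 ∧ p.1 ≤ hi)) = true) ↔
        ∃ c : List Int, c.Sublist ts ∧ c.length = k₀ + 1 ∧ lo ≤ c.sum ∧ c.sum ≤ hi := by
      rw [List.any_eq_true]
      have := pvState_window ts k₀ (fun s => lo ≤ s ∧ s ≤ hi)
      constructor
      · rintro ⟨p, hp, hw⟩
        obtain ⟨c, hc1, hc2, hc3⟩ := this.1 ⟨p, (hnxt p).1 hp, by simpa using hw⟩
        exact ⟨c, hc1, hc2, hc3.1, hc3.2⟩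
      · rintro ⟨c, hc1, hc2, hc3, hc4⟩
        obtain ⟨p, hp, hw⟩ := this.2 ⟨c, hc1, hc2, hc3, hc4⟩
        exact ⟨p, (hnxt p).2 hp, by simpa using hw⟩
    rw [List.range'_succ]
    simp only [pvLoop]
    split_ifs with hcond
    · simp only [true_iff]
      rw [Bool.and_eq_true, Bool.or_eq_true, Bool.not_eq_true'] at hcond
      obtain ⟨c, hc1, hc2, hc3, hc4⟩ := hwin.1 hcond.2
      refine ⟨k₀ + 1, le_refl _, by omega, ?_, c, hc1, hc2, hc3, hc4⟩
      intro hlim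
      rcases hcond.1 with h | h
      · rw [hlim] at h; simp at h
      · simpa using h
    · have hl' : ∀ p, p ∈ PySem.Set.ofList (pvNext ts layer) ↔ pvState ts (k₀ + 1) p := by
        intro p
        rw [PySem.Set.mem_ofList]
        exact hnxt p
      rw [show k₀ + 1 + 1 = (k₀ + 1) + 1 from rfl, ih (k₀ + 1) _ hl']
      have hno : ¬((limit = true → k₀ + 1 = 3) ∧
          ∃ c : List Int, c.Sublist ts ∧ c.length = k₀ + 1 ∧ lo ≤ c.sum ∧ c.sum ≤ hi) := by
        rintro ⟨h3, hc⟩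
        apply hcond
        rw [Bool.and_eq_true, Bool.or_eq_true, Bool.not_eq_true']
        refine ⟨?_, hwin.2 hc⟩
        rcases Bool.eq_false_or_eq_true limit with hlim | hlim
        · exact Or.inr (by simp [h3 hlim])
        · exact Or.inl hlim
      constructor
      · rintro ⟨k, h1, h2, h3, hc⟩
        exact ⟨k, by omega, by omega, h3, hc⟩
      · rintro ⟨k, h1, h2, h3, hc⟩
        refine ⟨k, ?_, by omega, h3, hc⟩
        by_contra h
        have hk : k = k₀ + 1 := by omega
        subst hk
        exact hno ⟨h3, hc⟩

-- ===== VERDICT (by name: the statement is the Claim_ definition above) =====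
theorem is_programation_possible_spec : Claim_equal_is_programation_possible := by
  intro L ts lim tol _ _
  unfold Spec_is_programation_possible is_programation_possible is_programation_possible_alt
  dsimp only
  have hinit : ∀ p, p ∈ (PySem.Set.ofList [((0 : Int), (-1 : Int))]) ↔ pvState ts 0 p := by
    intro p
    rw [PySem.Set.mem_ofList]
    constructor
    · intro h; simp at h; exact Or.inl ⟨rfl, h⟩
    · rintro (⟨_, rfl⟩ | ⟨j, _, _, c, _, hck, _⟩)
      · simp
      · omega
  split_ifs with h1 h2 h3 h4
  · rfl
  · rfl
  · rfl
  · -- limit_number_of_tracks = true: size-3 combinations vs layers 1..3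
    rw [Bool.eq_iff_iff, pyHelperA_iff,
      pvLoop_iff ts (L - tol) (L + tol) lim 3 0 _ hinit]
    constructor
    · rintro ⟨c, hc, hl, hw1, hw2⟩
      exact ⟨3, by omega, by omega, fun _ => rfl, c, hc, hl, hw1, hw2⟩
    · rintro ⟨k, _, _, h3', c, hc, hl, hw1, hw2⟩
      rw [h3' h4] at hl
      exact ⟨c, hc, hl, hw1, hw2⟩
  · -- limit_number_of_tracks = false: sizes 1..n-1 vs layers 1..n-1
    rw [Bool.eq_iff_iff,
      pvLoop_iff ts (L - tol) (L + tol) lim (ts.length - 1) 0 _ hinit]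
    simp only [List.any_eq_true, pyHelperA_iff]
    constructor
    · rintro ⟨k, hk, c, hc, hl, hw1, hw2⟩
      rw [List.mem_range'_1] at hk
      exact ⟨k, hk.1, hk.2, fun h => absurd h h4, c, hc, hl, hw1, hw2⟩
    · rintro ⟨k, hk1, hk2, _, c, hc, hl, hw1, hw2⟩
      exact ⟨k, List.mem_range'_1.2 ⟨hk1, hk2⟩, c, hc, hl, hw1, hw2⟩
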